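-- pv_equiv track=rewrite | github.com/sagemath/sage | src/sage/graphs/maps/map_generator.py | checkPrefixCondition
-- ===== SOURCE A (Python) =====
-- def checkPrefixCondition(bits: list[int]) -> bool:
--     """
--     INPUT:
--
--     - ``bits`` -- List[int] ; a list containing 0 and 1
--
--     OUTPUT:
--
--         A boolean indicating if for every prefix 3*n_1-n_0>-2 where n_1 is the number of 1 in the prefix
--         and n_0 the number of 0 in the prefix
--
--     EXAMPLES::
--
--         sage: mg = MapGenerator()
--         sage: mg.getRandomTwoLeafBitString(4,seed=42)
--         [0, 1, 0, 0, 0, 1, 1, 0, 0, 0, 0, 0, 0, 0]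
--         sage: mg.checkPrefixCondition(mg.getRandomTwoLeafBitString(4,seed=42))
--         True
--
--     NOTE:
--
--         O(len(bits))
--     """
--     current_sum = 0
--     for j in range(len(bits)-1):
--         bit = bits[j]
--         current_sum += 3 if bit == 1 else -1
--         if current_sum <= -2:
--             return False
--     return True
-- ===== SOURCE B (Python) =====
-- def checkPrefixCondition(bits: list[int]) -> bool:
--     # Two staged passes over counts of ones instead of a running weighted sum:
--     # after the (j+1)-th bit the prefix sum 3*n1-n0 equals 4*ones-j-1, so the
--     # condition "sum > -2" for the prefix ending at index j is "j <= 4*ones".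
--     body = bits[:-1]
--     counts = []
--     c = 0
--     for b in body:
--         if b == 1:
--             c += 1
--         counts.append(c)
--     return all(j <= 4 * c for j, c in enumerate(counts))
-- ===== Notes on version B (the rewrite author's own statement) =====
-- stated objective: alternative
-- what changed: B drops A's running weighted sum with early return: it first builds the list of prefix one-counts, then checks the arithmetic condition j <= 4*ones_j for every index in a separate all() pass over enumerate.
import Mathlib
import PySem

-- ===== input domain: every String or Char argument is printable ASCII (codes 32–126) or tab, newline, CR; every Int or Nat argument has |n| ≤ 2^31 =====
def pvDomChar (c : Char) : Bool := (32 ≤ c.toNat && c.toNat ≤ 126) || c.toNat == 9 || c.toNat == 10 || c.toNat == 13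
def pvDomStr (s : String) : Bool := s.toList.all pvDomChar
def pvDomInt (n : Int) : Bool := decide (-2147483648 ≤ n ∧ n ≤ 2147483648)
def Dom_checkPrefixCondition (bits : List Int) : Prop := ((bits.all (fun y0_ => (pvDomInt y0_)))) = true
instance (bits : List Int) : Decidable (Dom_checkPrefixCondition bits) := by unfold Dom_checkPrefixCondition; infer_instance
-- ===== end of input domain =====

-- B replaces A's running weighted sum with early return by two staged passes:
-- build the prefix one-counts, then check j ≤ 4*count_j for every index (alternative).
-- ===== PORT A =====
def pvALoop : List Int → Int → Bool
  | [], _ => true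
  | bit :: rest, currentSum =>
    let s' := currentSum + (if bit == 1 then 3 else -1)
    if s' ≤ -2 then false else pvALoop rest s'

def checkPrefixCondition (bits : List Int) : Bool :=
  pvALoop (bits.take (bits.length - 1)) 0

-- ===== PORT B =====
-- first pass of Source B: prefix counts of ones (accumulator c)
def pvCounts : List Int → Int → List Int
  | [], _ => []
  | b :: rest, c =>
    let c' := if b == 1 then c + 1 else c
    c' :: pvCounts rest c'

-- second pass: all(j <= 4*c for j, c in enumerate(counts))
def checkPrefixCondition_alt (bits : List Int) : Bool :=
  let body := bits.take (bits.length - 1)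
  (PySem.List.enumerate (pvCounts body 0)).all (fun p => decide (p.1 ≤ 4 * p.2))

-- ===== PRECONDITION & SPEC =====
def Spec_checkPrefixCondition (bits : List Int) (out : Bool) : Prop := out = checkPrefixCondition_alt bits
instance (bits : List Int) (out : Bool) : Decidable (Spec_checkPrefixCondition bits out) := by unfold Spec_checkPrefixCondition; infer_instance

-- ===== CLAIM (what is proved, stated in full; the proofs are below) =====
def Claim_equal_checkPrefixCondition : Prop := ∀ (bits : List Int), Dom_checkPrefixCondition bits → Spec_checkPrefixCondition bits (checkPrefixCondition bits)

-- ===== LEMMAS AND PROOFS =====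
theorem pvALoop_eq_counts (l : List Int) : ∀ (c n : Int),
    pvALoop l (4 * c - n) = (PySem.List.enumerate (pvCounts l c) n).all (fun p => decide (p.1 ≤ 4 * p.2)) := by
  induction l with
  | nil => intro c n; simp [pvALoop, pvCounts, PySem.List.enumerate_nil]
  | cons b rest ih =>
    intro c n
    simp only [pvALoop, pvCounts, PySem.List.enumerate_cons, List.all_cons]
    have hs : 4 * c - n + (if b == 1 then 3 else -1)
        = 4 * (if b == 1 then c + 1 else c) - (n + 1) := by
      split_ifs <;> ring
    rw [hs]
    by_cases hf : 4 * (if b == 1 then c + 1 else c) - (n + 1) ≤ -2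
    · rw [if_pos hf]
      have hn : ¬ (n ≤ 4 * (if b == 1 then c + 1 else c)) := by omega
      rw [decide_eq_false hn, Bool.false_and]
    · rw [if_neg hf, ih]
      have hn : n ≤ 4 * (if b == 1 then c + 1 else c) := by omega
      rw [decide_eq_true hn, Bool.true_and]

-- ===== VERDICT (by name: the statement is the Claim_ definition above) =====
theorem checkPrefixCondition_spec : Claim_equal_checkPrefixCondition := by
  intro bits _
  unfold Spec_checkPrefixCondition checkPrefixCondition checkPrefixCondition_alt
  have h := pvALoop_eq_counts (bits.take (bits.length - 1)) 0 0
  simpa [PySem.List.enumerate] using h
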